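-- pv_equiv track=rewrite | github.com/amaslyaev/noorm | noorm/_sqlite_common.py | _propagate_named_params
-- ===== SOURCE A (Python) =====
-- def _propagate_named_params(list_param_sizes: dict[str, int], code: str) -> str:
--     for pname, size in list_param_sizes.items():
--         code_parts: list[str] = []
--         pname_len = len(pname)
--         cleaned_pname = pname[1:]
--         while True:
--             pos = code.find(pname)
--             if pos == -1:
--                 code = "".join(code_parts) + code
--                 break
--             if pos > 0:
--                 code_parts.append(code[:pos])
--                 code = code[pos:]
--             next_char = code[pname_len : pname_len + 1]
--             if next_char and next_char.isalnum() or next_char == "_":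
--                 code_parts.append(code[:pname_len])
--             else:
--                 code_parts.append(
--                     ", ".join(f":__{cleaned_pname}_{i}" for i in range(size))
--                 )
--             code = code[pname_len:]
--     return code
-- ===== SOURCE B (Python) =====
-- def _propagate_named_params(list_param_sizes: dict[str, int], code: str) -> str:
--     # One split per parameter, then a single right-to-left rebuild pass that
--     # carries the "next character"; the replacement text is computed once.
--     for pname, size in list_param_sizes.items():
--         repl = ", ".join(f":__{pname[1:]}_{i}" for i in range(size))
--         segs = code.split(pname)
--         pieces = [segs[-1]]
--         nc = segs[-1][:1]
--         for seg in reversed(segs[:-1]):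
--             pieces.append(pname if (nc.isalnum() or nc == "_") else repl)
--             pieces.append(seg)
--             nc = seg[:1] or pname[:1]
--         code = "".join(reversed(pieces))
--     return code
-- ===== Notes on version B (the rewrite author's own statement) =====
-- stated objective: alternative
-- what changed: Instead of A's while-loop that repeatedly re-searches and re-slices the remaining string and re-builds the replacement string at every occurrence, B splits the code once per parameter with str.split and rebuilds it in a single right-to-left pass that carries the following character, computing the replacement string once.
import Mathlib
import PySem

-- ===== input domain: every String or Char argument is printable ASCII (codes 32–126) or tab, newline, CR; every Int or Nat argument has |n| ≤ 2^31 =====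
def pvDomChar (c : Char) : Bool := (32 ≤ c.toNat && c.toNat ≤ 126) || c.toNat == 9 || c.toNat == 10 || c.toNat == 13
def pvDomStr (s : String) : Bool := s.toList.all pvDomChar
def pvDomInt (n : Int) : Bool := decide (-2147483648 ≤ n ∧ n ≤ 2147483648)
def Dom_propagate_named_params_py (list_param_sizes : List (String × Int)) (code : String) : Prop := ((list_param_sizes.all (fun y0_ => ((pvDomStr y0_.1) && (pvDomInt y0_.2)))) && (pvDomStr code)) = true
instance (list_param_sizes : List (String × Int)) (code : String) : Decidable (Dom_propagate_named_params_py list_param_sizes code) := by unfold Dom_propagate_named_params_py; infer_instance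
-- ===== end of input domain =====

-- B replaces A's repeated find/slice/rebuild loop by one split per parameter and a single
-- right-to-left rebuild pass carrying the "next character" (objective: alternative).

-- ===== PORT A =====
-- ", ".join(f":__{cleaned_pname}_{i}" for i in range(size))
def pvJoinRepl (cleaned : List Char) (size : Int) : List Char :=
  PySem.Chars.join [',', ' '] ((PySem.List.pyRange 0 size 1).map
    (fun i => [':', '_', '_'] ++ cleaned ++ ['_'] ++ (PySem.Int.toStr i).toList))

-- the 'while True' loop of A; fuel = initial code.length + 1 always suffices (each
-- iteration consumes at least one character when pname ≠ []; pname = "" is outside Pre_)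
def pvALoop (pname cleaned : List Char) (size : Int) :
    Nat → List (List Char) → List Char → List Char
  | 0, code_parts, code => PySem.Chars.join [] code_parts ++ code
  | fuel + 1, code_parts, code =>
    let pos := PySem.Chars.find code pname
    if pos = -1 then
      PySem.Chars.join [] code_parts ++ code
    else
      let code_parts1 := if pos > 0 then code_parts ++ [PySem.Chars.slice code none (some pos)] else code_parts
      let code1 := if pos > 0 then PySem.Chars.slice code (some pos) none else code
      let next_char := PySem.Chars.slice code1 (some (pname.length : Int)) (some ((pname.length : Int) + 1))
      let code_parts2 :=
        if (!next_char.isEmpty && PySem.Chars.strIsalnum next_char) || next_char == ['_'] then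
          code_parts1 ++ [PySem.Chars.slice code1 none (some (pname.length : Int))]
        else
          code_parts1 ++ [pvJoinRepl cleaned size]
      pvALoop pname cleaned size fuel code_parts2 (PySem.Chars.slice code1 (some (pname.length : Int)) none)

-- the dict[str, int] argument arrives as an association list; .items() iterates the dict built from it
def propagate_named_params_py (list_param_sizes : List (String × Int)) (code : String) : String :=
  String.ofList (((PySem.Dict.ofList list_param_sizes).items).foldl
    (fun code p =>
      pvALoop p.1.toList (PySem.Chars.slice p.1.toList (some 1) none) p.2 (code.length + 1) [] code)
    code.toList)

-- ===== PORT B =====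
-- loop body of Source B: pieces.append(pname or repl); pieces.append(seg); nc = seg[:1] or pname[:1]
def pvBStep (pname repl : List Char) (st : List (List Char) × List Char) (seg : List Char) :
    List (List Char) × List Char :=
  let pieces := (st.1 ++ [if PySem.Chars.strIsalnum st.2 || st.2 == ['_'] then pname else repl]) ++ [seg]
  let s1 := PySem.Chars.slice seg none (some 1)
  (pieces, if !s1.isEmpty then s1 else PySem.Chars.slice pname none (some 1))

def pvBParam (pname : List Char) (size : Int) (code : List Char) : List Char :=
  let repl := pvJoinRepl (PySem.Chars.slice pname (some 1) none) size
  let segs := PySem.Chars.splitOn code pname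
  let lastSeg := PySem.List.pyGetD segs (-1) []
  let st := ((PySem.List.slice segs none (some (-1))).reverse).foldl (pvBStep pname repl)
      ([lastSeg], PySem.Chars.slice lastSeg none (some 1))
  PySem.Chars.join [] st.1.reverse

def propagate_named_params_py_alt (list_param_sizes : List (String × Int)) (code : String) : String :=
  String.ofList (((PySem.Dict.ofList list_param_sizes).items).foldl
    (fun code p => pvBParam p.1.toList p.2 code)
    code.toList)

-- ===== PRECONDITION & SPEC =====
-- Pre_ excludes only an empty-string parameter name, on which A's 'while True' loop never
-- terminates (code.find("") is always 0 and the string is never shortened) and B's str.split("")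
-- raises ValueError: A returns on no such input.
def Pre_propagate_named_params_py (list_param_sizes : List (String × Int)) (code : String) : Prop :=
  ∀ p ∈ list_param_sizes, p.1 ≠ ""
instance (list_param_sizes : List (String × Int)) (code : String) : Decidable (Pre_propagate_named_params_py list_param_sizes code) := by unfold Pre_propagate_named_params_py; infer_instance

def pvWitness_propagate_named_params_py : (List (String × Int)) × String :=
  ([(":ids", 2)], "a in :ids")

def Spec_propagate_named_params_py (list_param_sizes : List (String × Int)) (code : String) (out : String) : Prop := out = propagate_named_params_py_alt list_param_sizes code
instance (list_param_sizes : List (String × Int)) (code : String) (out : String) : Decidable (Spec_propagate_named_params_py list_param_sizes code out) := by unfold Spec_propagate_named_params_py; infer_instance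

-- ===== CLAIM (what is proved, stated in full; the proofs are below) =====
def Claim_equal_propagate_named_params_py : Prop := ∀ (list_param_sizes : List (String × Int)) (code : String), Dom_propagate_named_params_py list_param_sizes code → Pre_propagate_named_params_py list_param_sizes code → Spec_propagate_named_params_py list_param_sizes code (propagate_named_params_py list_param_sizes code)

-- ===== LEMMAS AND PROOFS =====

-- common reference semantics: Python's code.split(sep) as find-based recursion, and the
-- rebuild of the output from the segment list
def pvSplitRec (sep : List Char) : Nat → List Char → List (List Char)
  | 0, code => [code]
  | f + 1, code =>
    let pos := PySem.Chars.find code sep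
    if pos = -1 then [code]
    else code.take pos.toNat :: pvSplitRec sep f (code.drop (pos.toNat + sep.length))

def pvKeep (nc : List Char) : Bool := PySem.Chars.strIsalnum nc || nc == ['_']

-- first character of the original text following an occurrence, read off the segment list
def pvNcFirst (pname : List Char) : List (List Char) → List Char
  | [] => []
  | [r] => r.take 1
  | r :: _ :: _ => if r = [] then pname.take 1 else r.take 1

def pvRebuild (pname repl : List Char) : List (List Char) → List Char
  | [] => []
  | [s] => s
  | s :: r :: t =>
    s ++ (if pvKeep (pvNcFirst pname (r :: t)) then pname else repl) ++ pvRebuild pname repl (r :: t)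

def pvConsFirst (x : List Char) : List (List Char) → List (List Char)
  | [] => [x]
  | s :: t => (x ++ s) :: t

theorem pvJoin_nil (parts : List (List Char)) : PySem.Chars.join [] parts = parts.flatten := by
  induction parts with
  | nil => rfl
  | cons s t ih =>
    cases t with
    | nil => simp [PySem.Chars.join, List.intercalate]
    | cons b t2 =>
      simp only [PySem.Chars.join, List.intercalate] at ih ⊢
      rw [show List.intersperse ([] : List Char) (s :: b :: t2) = s :: [] :: List.intersperse [] (b :: t2) from by simp [List.intersperse]]
      simp only [List.flatten_cons, List.nil_append] at ih ⊢
      rw [ih]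

theorem pvFind_nil (sep : List Char) (h : sep ≠ []) : PySem.Chars.find [] sep = -1 := by
  rw [PySem.Chars.find_eq_neg_one_iff]
  simp [h]

theorem pvFind_eq_zero_of_prefix (l sep : List Char) (h : sep <+: l) :
    PySem.Chars.find l sep = 0 := by
  have hnn : 0 ≤ PySem.Chars.find l sep :=
    (PySem.Chars.find_nonneg_iff l sep).2 h.isInfix
  obtain ⟨h1, h2⟩ := PySem.Chars.find_spec hnn
  by_contra hne
  have hpos : 0 < (PySem.Chars.find l sep).toNat := by omega
  exact h2 0 hpos (by simpa using h)

theorem pvFind_eq_of (l sep : List Char) (j : Nat) (h1 : sep <+: l.drop j)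
    (h2 : ∀ i < j, ¬ sep <+: l.drop i) : PySem.Chars.find l sep = j := by
  have hinf : sep <:+: l := h1.isInfix.trans (List.drop_suffix j l).isInfix
  have hnn : 0 ≤ PySem.Chars.find l sep := (PySem.Chars.find_nonneg_iff l sep).2 hinf
  obtain ⟨hp, hmin⟩ := PySem.Chars.find_spec hnn
  have hle : ¬ (PySem.Chars.find l sep).toNat < j := fun hlt => h2 _ hlt hp
  have hge : ¬ j < (PySem.Chars.find l sep).toNat := fun hlt => hmin j hlt h1
  omega

theorem pvFind_cons (c : Char) (rest sep : List Char) (h : ¬ sep <+: (c :: rest)) :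
    PySem.Chars.find (c :: rest) sep =
      if PySem.Chars.find rest sep = -1 then -1 else PySem.Chars.find rest sep + 1 := by
  by_cases hr : PySem.Chars.find rest sep = -1
  · rw [if_pos hr, PySem.Chars.find_eq_neg_one_iff]
    rw [PySem.Chars.find_eq_neg_one_iff] at hr
    intro hinf
    have hin : PySem.Chars.isIn sep (c :: rest) = true := (PySem.Chars.isIn_iff_infix _ _).2 hinf
    obtain ⟨j, hj⟩ := (PySem.Chars.exists_prefix_drop_iff_isIn _ _).2 hin
    cases j with
    | zero => exact h (by simpa using hj)
    | succ i =>
      have hj' : sep <+: rest.drop i := by simpa using hj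
      exact hr (hj'.isInfix.trans (List.drop_suffix i rest).isInfix)
  · rw [if_neg hr]
    have hnn : 0 ≤ PySem.Chars.find rest sep := by
      have := PySem.Chars.neg_one_le_find rest sep; omega
    obtain ⟨hp, hmin⟩ := PySem.Chars.find_spec hnn
    have heq := pvFind_eq_of (c :: rest) sep ((PySem.Chars.find rest sep).toNat + 1)
      (by simpa using hp)
      (by
        intro i hi
        cases i with
        | zero => simpa using h
        | succ i' => simpa using hmin i' (by omega))
    rw [heq]; push_cast; omega

theorem pvSplitRec_ne_nil (sep : List Char) (f : Nat) (code : List Char) :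
    pvSplitRec sep f code ≠ [] := by
  cases f with
  | zero => simp [pvSplitRec]
  | succ n => simp only [pvSplitRec]; split <;> simp

theorem pvSplitRec_succ (sep : List Char) (f : Nat) (code : List Char) :
    pvSplitRec sep (f + 1) code =
      if PySem.Chars.find code sep = -1 then [code]
      else code.take (PySem.Chars.find code sep).toNat ::
        pvSplitRec sep f (code.drop ((PySem.Chars.find code sep).toNat + sep.length)) := rfl

theorem pvSplitRec_fuel (sep : List Char) (hsep : sep ≠ []) :
    ∀ f1 f2 code, code.length < f1 → code.length < f2 →
      pvSplitRec sep f1 code = pvSplitRec sep f2 code := by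
  intro f1
  induction f1 with
  | zero => intro f2 code h1 h2; omega
  | succ n ih =>
    intro f2 code h1 h2
    cases f2 with
    | zero => omega
    | succ m =>
      simp only [pvSplitRec]
      by_cases hpos : PySem.Chars.find code sep = -1
      · simp [hpos]
      · simp only [hpos, if_neg, if_false]
        have hnn : 0 ≤ PySem.Chars.find code sep := by
          have := PySem.Chars.neg_one_le_find code sep; omega
        have hinf : sep <:+: code := (PySem.Chars.find_nonneg_iff code sep).1 hnn
        have hsl : 1 ≤ sep.length := List.length_pos_iff.2 hsep
        have hcl : sep.length ≤ code.length := hinf.length_le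
        congr 1
        exact ih _ _ (by simp; omega) (by simp; omega)

theorem pvGo_spec (sep : List Char) (hsep : sep ≠ []) :
    ∀ fuel l cur acc, l.length ≤ fuel →
      PySem.Chars.splitOn.go sep fuel l cur acc =
        acc.reverse ++ pvConsFirst cur.reverse (pvSplitRec sep (l.length + 1) l) := by
  have hsl : 1 ≤ sep.length := List.length_pos_iff.2 hsep
  intro fuel
  induction fuel with
  | zero =>
    intro l cur acc hl
    have hl0 : l = [] := List.length_eq_zero_iff.1 (Nat.le_zero.1 hl)
    subst hl0
    simp only [PySem.Chars.splitOn.go, pvSplitRec_succ, pvFind_nil sep hsep, if_pos rfl, pvConsFirst]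
    simp
  | succ fuel ih =>
    intro l cur acc hl
    cases l with
    | nil =>
      simp only [PySem.Chars.splitOn.go, pvSplitRec_succ, pvFind_nil sep hsep, if_pos rfl, pvConsFirst]
      simp
    | cons c rest =>
      by_cases hpre : sep.isPrefixOf (c :: rest) = true
      · have hpre' : sep <+: (c :: rest) := List.isPrefixOf_iff_prefix.1 hpre
        have hgo : PySem.Chars.splitOn.go sep (fuel + 1) (c :: rest) cur acc =
            PySem.Chars.splitOn.go sep fuel (List.drop sep.length (c :: rest)) [] (cur.reverse :: acc) := by
          simp only [PySem.Chars.splitOn.go, hpre, if_pos]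
        have hfind : PySem.Chars.find (c :: rest) sep = 0 := pvFind_eq_zero_of_prefix _ _ hpre'
        have hne0 : PySem.Chars.find (c :: rest) sep ≠ -1 := by omega
        have hrhs : pvSplitRec sep ((c :: rest).length + 1) (c :: rest) =
            [] :: pvSplitRec sep ((List.drop sep.length (c :: rest)).length + 1)
              (List.drop sep.length (c :: rest)) := by
          rw [pvSplitRec_succ, if_neg hne0, hfind]
          simp only [Int.toNat_zero, List.take_zero, Nat.zero_add]
          congr 1
          apply pvSplitRec_fuel sep hsep <;> simp <;> omega
        rw [hgo, ih _ _ _ (by simp at hl ⊢; omega), hrhs]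
        obtain ⟨x, t, hS⟩ : ∃ x t, pvSplitRec sep ((List.drop sep.length (c :: rest)).length + 1)
            (List.drop sep.length (c :: rest)) = x :: t := by
          cases hS : pvSplitRec sep ((List.drop sep.length (c :: rest)).length + 1)
              (List.drop sep.length (c :: rest)) with
          | nil => exact absurd hS (pvSplitRec_ne_nil _ _ _)
          | cons x t => exact ⟨x, t, rfl⟩
        rw [hS]
        simp [pvConsFirst]
      · have hpre' : ¬ sep <+: (c :: rest) := fun hx => hpre (List.isPrefixOf_iff_prefix.2 hx)
        have hgo : PySem.Chars.splitOn.go sep (fuel + 1) (c :: rest) cur acc =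
            PySem.Chars.splitOn.go sep fuel rest (c :: cur) acc := by
          simp only [PySem.Chars.splitOn.go, hpre]
          norm_num
        rw [hgo, ih _ _ _ (by simp at hl ⊢; omega)]
        have hfc := pvFind_cons c rest sep hpre'
        by_cases hr : PySem.Chars.find rest sep = -1
        · rw [if_pos hr] at hfc
          have hlhs : pvSplitRec sep (rest.length + 1) rest = [rest] := by
            rw [pvSplitRec_succ, if_pos hr]
          have hrhs : pvSplitRec sep ((c :: rest).length + 1) (c :: rest) = [c :: rest] := by
            rw [pvSplitRec_succ, if_pos hfc]
          rw [hlhs, hrhs]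
          simp [pvConsFirst]
        · rw [if_neg hr] at hfc
          have hnn : 0 ≤ PySem.Chars.find rest sep := by
            have := PySem.Chars.neg_one_le_find rest sep; omega
          have hinf : sep <:+: rest := (PySem.Chars.find_nonneg_iff rest sep).1 hnn
          have hrl : sep.length ≤ rest.length := hinf.length_le
          have hne2 : PySem.Chars.find (c :: rest) sep ≠ -1 := by rw [hfc]; omega
          have htn : (PySem.Chars.find rest sep + 1).toNat = (PySem.Chars.find rest sep).toNat + 1 := by
            omega
          have hlhs : pvSplitRec sep (rest.length + 1) rest =
              List.take (PySem.Chars.find rest sep).toNat rest ::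
                pvSplitRec sep rest.length
                  (List.drop ((PySem.Chars.find rest sep).toNat + sep.length) rest) := by
            rw [pvSplitRec_succ, if_neg hr]
          have hrhs : pvSplitRec sep ((c :: rest).length + 1) (c :: rest) =
              (c :: List.take (PySem.Chars.find rest sep).toNat rest) ::
                pvSplitRec sep rest.length
                  (List.drop ((PySem.Chars.find rest sep).toNat + sep.length) rest) := by
            rw [pvSplitRec_succ, if_neg hne2, hfc, htn]
            rw [show (PySem.Chars.find rest sep).toNat + 1 + sep.length =
              ((PySem.Chars.find rest sep).toNat + sep.length) + 1 from by omega]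
            simp only [List.take_succ_cons, List.drop_succ_cons, List.length_cons]
            congr 1
            apply pvSplitRec_fuel sep hsep <;> simp <;> omega
          rw [hlhs, hrhs]
          simp [pvConsFirst]

theorem pvSplitOn_eq (code sep : List Char) (hsep : sep ≠ []) :
    PySem.Chars.splitOn code sep = pvSplitRec sep (code.length + 1) code := by
  rw [PySem.Chars.splitOn, pvGo_spec sep hsep _ _ _ _ (by omega)]
  obtain ⟨x, t, hS⟩ : ∃ x t, pvSplitRec sep (code.length + 1) code = x :: t := by
    cases hS : pvSplitRec sep (code.length + 1) code with
    | nil => exact absurd hS (pvSplitRec_ne_nil _ _ _)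
    | cons x t => exact ⟨x, t, rfl⟩
  rw [hS]
  simp [pvConsFirst]

theorem pvNcFirst_splitRec (sep code : List Char) (hsep : sep ≠ []) (f : Nat)
    (hf : code.length < f) : pvNcFirst sep (pvSplitRec sep f code) = code.take 1 := by
  have hsl : 1 ≤ sep.length := List.length_pos_iff.2 hsep
  cases f with
  | zero => omega
  | succ f' =>
    rw [pvSplitRec_succ]
    by_cases hpos : PySem.Chars.find code sep = -1
    · rw [if_pos hpos]; rfl
    · rw [if_neg hpos]
      have hnn : 0 ≤ PySem.Chars.find code sep := by
        have := PySem.Chars.neg_one_le_find code sep; omega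
      obtain ⟨hp, _⟩ := PySem.Chars.find_spec hnn
      have hinf : sep <:+: code := (PySem.Chars.find_nonneg_iff code sep).1 hnn
      have hcl : 1 ≤ code.length := le_trans hsl hinf.length_le
      obtain ⟨x, t, hS⟩ : ∃ x t, pvSplitRec sep f'
          (code.drop ((PySem.Chars.find code sep).toNat + sep.length)) = x :: t := by
        cases hS : pvSplitRec sep f' (code.drop ((PySem.Chars.find code sep).toNat + sep.length)) with
        | nil => exact absurd hS (pvSplitRec_ne_nil _ _ _)
        | cons x t => exact ⟨x, t, rfl⟩
      rw [hS]
      show (if List.take (PySem.Chars.find code sep).toNat code = [] then sep.take 1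
        else (List.take (PySem.Chars.find code sep).toNat code).take 1) = code.take 1
      by_cases hz : (PySem.Chars.find code sep).toNat = 0
      · rw [if_pos (by simp [hz])]
        have hp0 : sep <+: code := by simpa [hz] using hp
        obtain ⟨tl, htl⟩ := hp0
        rw [← htl, List.take_append]
        rw [show 1 - sep.length = 0 from by omega]
        simp
      · have hcne : code ≠ [] := by intro h; subst h; simp at hcl
        have hne : List.take (PySem.Chars.find code sep).toNat code ≠ [] := by
          simp [List.take_eq_nil_iff, hz, hcne]
        rw [if_neg hne, List.take_take]
        congr 1
        omega

theorem pvKeepA_eq (nc : List Char) :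
    ((!nc.isEmpty && PySem.Chars.strIsalnum nc) || nc == ['_']) = pvKeep nc := by
  cases nc <;> simp [pvKeep, PySem.Chars.strIsalnum]

theorem pvALoop_spec (pname cleaned : List Char) (size : Int) (hp : pname ≠ []) :
    ∀ fuel code parts, code.length < fuel →
      pvALoop pname cleaned size fuel parts code =
        PySem.Chars.join [] parts ++
          pvRebuild pname (pvJoinRepl cleaned size) (pvSplitRec pname (code.length + 1) code) := by
  have hsl : 1 ≤ pname.length := List.length_pos_iff.2 hp
  intro fuel
  induction fuel with
  | zero => intro code parts h; omega
  | succ fuel ih =>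
    intro code parts hlen
    by_cases hpos : PySem.Chars.find code pname = -1
    · rw [pvSplitRec_succ, if_pos hpos]
      simp only [pvALoop, hpos, if_pos rfl, if_true]
      simp [pvRebuild]
    · have hnn : 0 ≤ PySem.Chars.find code pname := by
        have := PySem.Chars.neg_one_le_find code pname; omega
      obtain ⟨hpfx, _⟩ := PySem.Chars.find_spec hnn
      have hlen2 : (PySem.Chars.find code pname).toNat + pname.length ≤ code.length := by
        have h1 := hpfx.length_le
        have h2 : (PySem.Chars.find code pname) ≤ (code.length : Int) :=
          PySem.Chars.find_le_length code pname
        simp [List.length_drop] at h1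
        omega
      obtain ⟨tl, htl⟩ := hpfx
      have hcode1 : (if PySem.Chars.find code pname > 0 then
          PySem.Chars.slice code (some (PySem.Chars.find code pname)) else code) =
          code.drop (PySem.Chars.find code pname).toNat := by
        split_ifs with hgt
        · rw [PySem.Chars.slice_eq_listSlice, PySem.List.slice_from code hnn]
        · have h0 : PySem.Chars.find code pname = 0 := by omega
          simp [h0]
      have hnext : PySem.Chars.slice (code.drop (PySem.Chars.find code pname).toNat)
          (some (pname.length : Int)) (some ((pname.length : Int) + 1)) =
          (code.drop ((PySem.Chars.find code pname).toNat + pname.length)).take 1 := by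
        rw [PySem.Chars.slice_eq_listSlice]
        rw [show ((pname.length : Int) + 1) = ((pname.length + 1 : Nat) : Int) from by push_cast; ring]
        rw [PySem.List.slice_natCast, List.drop_drop]
        congr 1
        omega
      have hpn : PySem.Chars.slice (code.drop (PySem.Chars.find code pname).toNat)
          none (some (pname.length : Int)) = pname := by
        rw [PySem.Chars.slice_eq_listSlice, PySem.List.slice_to_natCast, ← htl, List.take_left]
      have hrem : PySem.Chars.slice (code.drop (PySem.Chars.find code pname).toNat)
          (some (pname.length : Int)) =
          code.drop ((PySem.Chars.find code pname).toNat + pname.length) := by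
        rw [PySem.Chars.slice_eq_listSlice,
          PySem.List.slice_from _ (by exact_mod_cast Int.natCast_nonneg pname.length)]
        rw [List.drop_drop]
        simp
      have hremlen : (code.drop ((PySem.Chars.find code pname).toNat + pname.length)).length < fuel := by
        simp [List.length_drop]
        omega
      simp only [pvALoop, hpos, if_false]
      rw [hcode1, hnext, hpn, hrem]
      rw [pvKeepA_eq]
      rw [ih _ _ hremlen]
      conv_rhs => rw [pvSplitRec_succ, if_neg hpos]
      have hfa : pvSplitRec pname code.length
          (code.drop ((PySem.Chars.find code pname).toNat + pname.length)) =
          pvSplitRec pname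
            ((code.drop ((PySem.Chars.find code pname).toNat + pname.length)).length + 1)
            (code.drop ((PySem.Chars.find code pname).toNat + pname.length)) := by
        apply pvSplitRec_fuel pname hp <;> simp <;> omega
      rw [hfa]
      obtain ⟨x, t, hS⟩ : ∃ x t, pvSplitRec pname
          ((code.drop ((PySem.Chars.find code pname).toNat + pname.length)).length + 1)
          (code.drop ((PySem.Chars.find code pname).toNat + pname.length)) = x :: t := by
        cases hS : pvSplitRec pname
            ((code.drop ((PySem.Chars.find code pname).toNat + pname.length)).length + 1)
            (code.drop ((PySem.Chars.find code pname).toNat + pname.length)) with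
        | nil => exact absurd hS (pvSplitRec_ne_nil _ _ _)
        | cons x t => exact ⟨x, t, rfl⟩
      rw [hS, pvRebuild]
      rw [show x :: t = pvSplitRec pname
          ((code.drop ((PySem.Chars.find code pname).toNat + pname.length)).length + 1)
          (code.drop ((PySem.Chars.find code pname).toNat + pname.length)) from hS.symm]
      rw [pvNcFirst_splitRec pname _ hp _ (by omega)]
      rw [pvJoin_nil, pvJoin_nil]
      have hto : PySem.Chars.slice code none (some (PySem.Chars.find code pname)) =
          code.take (PySem.Chars.find code pname).toNat := by
        rw [PySem.Chars.slice_eq_listSlice, PySem.List.slice_to code hnn]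
      rw [hto]
      split_ifs with hk hgt hgt
      · simp [List.append_assoc]
      · have h0 : (PySem.Chars.find code pname).toNat = 0 := by omega
        simp [h0, List.append_assoc]
      · simp [List.append_assoc]
      · have h0 : (PySem.Chars.find code pname).toNat = 0 := by omega
        simp [h0, List.append_assoc]

theorem pvBFold_spec (pname repl : List Char) (hp : pname ≠ []) :
    ∀ (pre : List (List Char)) (lastSeg : List Char),
      (List.foldr (fun seg st => pvBStep pname repl st seg) ([lastSeg], lastSeg.take 1) pre).1.reverse.flatten
          = pvRebuild pname repl (pre ++ [lastSeg]) ∧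
      (List.foldr (fun seg st => pvBStep pname repl st seg) ([lastSeg], lastSeg.take 1) pre).2
          = pvNcFirst pname (pre ++ [lastSeg]) := by
  intro pre
  induction pre with
  | nil => intro lastSeg; constructor <;> simp [pvRebuild, pvNcFirst]
  | cons s pre ih =>
    intro lastSeg
    obtain ⟨ih1, ih2⟩ := ih lastSeg
    obtain ⟨r, t, hrt⟩ : ∃ r t, pre ++ [lastSeg] = r :: t := by
      cases pre with
      | nil => exact ⟨lastSeg, [], rfl⟩
      | cons a b => exact ⟨a, b ++ [lastSeg], rfl⟩
    have hslice1 : ∀ xs : List Char, PySem.Chars.slice xs none (some 1) = xs.take 1 := by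
      intro xs
      simpa using PySem.List.slice_to_natCast xs 1
    rw [List.foldr_cons]
    set st' := List.foldr (fun seg st => pvBStep pname repl st seg) ([lastSeg], lastSeg.take 1) pre
      with hst'
    constructor
    · simp only [pvBStep]
      simp only [List.reverse_append, List.reverse_cons, List.reverse_nil, List.nil_append,
        List.singleton_append, List.flatten_cons, List.cons_append, List.flatten_nil,
        List.append_nil]
      rw [ih1, ih2]
      conv_rhs => rw [show s :: (pre ++ [lastSeg]) = s :: r :: t from by rw [hrt]]
      rw [pvRebuild, ← hrt, pvKeep]
      simp [List.append_assoc]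
    · simp only [pvBStep]
      rw [hslice1, hslice1]
      conv_rhs => rw [List.cons_append, hrt]
      cases s with
      | nil => simp [pvNcFirst]
      | cons a as => simp [pvNcFirst]

theorem pvParam_eq (pname : List Char) (size : Int) (code : List Char) (hp : pname ≠ []) :
    pvALoop pname (PySem.Chars.slice pname (some 1) none) size (code.length + 1) [] code =
      pvBParam pname size code := by
  have hsl : 1 ≤ pname.length := List.length_pos_iff.2 hp
  rw [pvALoop_spec pname (PySem.Chars.slice pname (some 1) none) size hp _ code [] (by omega)]
  rw [show PySem.Chars.join [] ([] : List (List Char)) = [] from rfl, List.nil_append]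
  simp only [pvBParam]
  rw [pvSplitOn_eq code pname hp]
  set segs := pvSplitRec pname (code.length + 1) code with hsegs
  have hne : segs ≠ [] := pvSplitRec_ne_nil _ _ _
  rw [PySem.List.slice_to_neg_one, PySem.List.pyGetD_neg_one segs [] hne]
  have hslice1 : ∀ xs : List Char, PySem.Chars.slice xs none (some 1) = xs.take 1 := by
    intro xs
    simpa using PySem.List.slice_to_natCast xs 1
  rw [hslice1]
  rw [List.foldl_reverse]
  obtain ⟨h1, _⟩ := pvBFold_spec pname (pvJoinRepl (PySem.Chars.slice pname (some 1) none) size) hp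
    segs.dropLast (segs.getLast hne)
  rw [pvJoin_nil, h1, List.dropLast_append_getLast hne]

-- ===== VERDICT (by name: the statement is the Claim_ definition above) =====
theorem propagate_named_params_py_spec : Claim_equal_propagate_named_params_py := by
  intro l code hdom hpre
  unfold Spec_propagate_named_params_py propagate_named_params_py propagate_named_params_py_alt
  congr 1
  apply PySem.List.foldl_congr_mem
  intro acc p hpmem
  have hkey : p.1 ∈ (PySem.Dict.ofList l).keys := PySem.Dict.mem_keys_of_mem_items _ hpmem
  have hkeys : (PySem.Dict.ofList l).keys = PySem.Set.ofList (l.map (·.1)) := by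
    show (PySem.Dict.empty.update l).keys = _
    rw [show PySem.Dict.update PySem.Dict.empty l =
      List.foldl (fun acc p => acc.insert p.1 p.2) PySem.Dict.empty l from rfl]
    rw [PySem.Dict.keys_foldl_insert_key l (·.1) (fun _ x => x.2) PySem.Dict.empty]
    rfl
  rw [hkeys, PySem.Set.mem_ofList] at hkey
  obtain ⟨q, hq, hq1⟩ := List.mem_map.1 hkey
  have hne : p.1 ≠ "" := hq1 ▸ hpre q hq
  have hnl : p.1.toList ≠ [] := by
    intro h
    apply hne
    have h2 := congrArg String.ofList h
    rwa [String.ofList_toList] at h2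
  exact pvParam_eq p.1.toList p.2 acc hnl
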